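-- pv_equiv track=rewrite | github.com/ASSERT-KTH/Mokav | experiments/pynguin/c4b/return-lst/generated_tests/src_1761/1/src_1761.py | func
-- ===== SOURCE A (Python) =====
-- def func(*args):
-- 	ret_values = []
--
-- 	x = int(args[0])
-- 	c = 0
-- 	while (x > 0):
-- 	    d = (x % 8)
-- 	    c += (d == 1)
-- 	    x = (x // 8)
-- 	ret_values.append(c)
--
-- 	return ret_values
-- ===== SOURCE B (Python) =====
-- def func(*args):
--     x = int(args[0])
--     return [oct(x).count('1') if x > 0 else 0]
-- ===== Notes on version B (the rewrite author's own statement) =====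
-- stated objective: simpler
-- what changed: Replaces the arithmetic modulo-8/division digit-extraction loop with building the octal string via oct(x) (guarded to x>0, matching A's never-entered loop otherwise) and counting '1' characters.
import Mathlib
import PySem

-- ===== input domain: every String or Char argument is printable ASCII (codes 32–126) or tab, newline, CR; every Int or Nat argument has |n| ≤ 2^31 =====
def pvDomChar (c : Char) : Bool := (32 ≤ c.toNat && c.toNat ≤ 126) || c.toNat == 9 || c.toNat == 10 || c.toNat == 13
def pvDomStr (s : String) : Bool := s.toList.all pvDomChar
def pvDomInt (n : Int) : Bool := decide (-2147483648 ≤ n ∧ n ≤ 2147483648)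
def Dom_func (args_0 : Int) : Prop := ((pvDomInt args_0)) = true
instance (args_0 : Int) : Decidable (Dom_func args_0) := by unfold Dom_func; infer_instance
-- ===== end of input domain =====

-- B replaces A's arithmetic digit-extraction loop by building the octal string (oct(x)) and counting '1' characters; objective: simpler.


-- ===== PORT A =====
-- A's while loop: extract octal digits by % 8 // 8, counting those equal to 1
def funcLoop (x c : Int) : Int :=
  if 0 < x then
    funcLoop (PySem.Int.floordiv x 8) (c + (if PySem.Int.mod x 8 = 1 then 1 else 0))
  else c
termination_by x.toNat
decreasing_by
  have h8 : PySem.Int.floordiv x 8 = x / 8 := PySem.Int.floordiv_eq_ediv_of_pos (by omega)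
  omega

def func (args_0 : Int) : List Int := [funcLoop args_0 0]

-- ===== PORT B =====
-- hand port of Python's oct(x) for x > 0: the octal digit characters of x (no prefix/sign)
def octDigits (x : Int) : List Char :=
  if 0 < x then
    octDigits (PySem.Int.floordiv x 8) ++ [Nat.digitChar (PySem.Int.mod x 8).toNat]
  else []
termination_by x.toNat
decreasing_by
  have h8 : PySem.Int.floordiv x 8 = x / 8 := PySem.Int.floordiv_eq_ediv_of_pos (by omega)
  omega

-- oct(x).count('1'): the '0o' prefix is carried explicitly; str.count of a single char is List.count on its chars (exact here)
def func_alt (args_0 : Int) : List Int :=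
  [if 0 < args_0 then (((['0', 'o'] ++ octDigits args_0).count '1' : Nat) : Int) else 0]

-- ===== PRECONDITION & SPEC =====
def Spec_func (args_0 : Int) (out : List Int) : Prop := out = func_alt args_0
instance (args_0 : Int) (out : List Int) : Decidable (Spec_func args_0 out) := by unfold Spec_func; infer_instance

-- ===== CLAIM (what is proved, stated in full; the proofs are below) =====
def Claim_equal_func : Prop := ∀ (args_0 : Int), Dom_func args_0 → Spec_func args_0 (func args_0)

-- ===== LEMMAS AND PROOFS =====
theorem funcLoop_eq_count (n : Nat) : ∀ x c : Int, x.toNat ≤ n →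
    funcLoop x c = c + ((octDigits x).count '1' : Nat) := by
  induction n with
  | zero =>
    intro x c hx
    rw [funcLoop, octDigits]
    have : ¬ 0 < x := by omega
    simp [this]
  | succ n ih =>
    intro x c hx
    rw [funcLoop, octDigits]
    by_cases hpos : 0 < x
    · have h8 : PySem.Int.floordiv x 8 = x / 8 := PySem.Int.floordiv_eq_ediv_of_pos (by omega)
      have hlt : x / 8 < x := by omega
      have hrec := ih (PySem.Int.floordiv x 8)
        (c + (if PySem.Int.mod x 8 = 1 then 1 else 0)) (by omega)
      have hm : PySem.Int.mod x 8 = x % 8 := PySem.Int.mod_eq_emod_of_pos (by omega)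
      have hmb : 0 ≤ x % 8 ∧ x % 8 < 8 := ⟨Int.emod_nonneg x (by omega), Int.emod_lt_of_pos x (by omega)⟩
      have hchar : (Nat.digitChar (PySem.Int.mod x 8).toNat = '1') ↔ (PySem.Int.mod x 8 = 1) := by
        rw [hm]
        have h0 := hmb.1; have h7 := hmb.2
        interval_cases (x % 8) <;> decide
      simp only [hpos, if_true, hrec, List.count_append, List.count_singleton, beq_iff_eq, hchar]
      rw [hm] at hrec ⊢
      by_cases h1 : x % 8 = 1
      · simp [h1]; ring
      · simp [h1]
    · simp [hpos]

-- ===== VERDICT (by name: the statement is the Claim_ definition above) =====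
theorem func_spec : Claim_equal_func := by
  intro x _
  unfold Spec_func func func_alt
  by_cases hpos : 0 < x
  · have h := funcLoop_eq_count x.toNat x 0 (le_refl _)
    simp [hpos, h]
  · rw [funcLoop]
    simp [hpos]
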